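-- pv_equiv track=rewrite | github.com/leopcortes/unb | apc/projeto-final/projeto-final.py | pegar_responsavel
-- ===== SOURCE A (Python) =====
-- def pegar_responsavel(s):
--     nome_responsavel = []
--     palavras = []
--     frases = s.split(". ")
--     ultima_frase = frases[-1].strip()
--     palavras_ultima_frase = ultima_frase.split()
--     for palavra in palavras_ultima_frase:
--         palavra = palavra.strip(",")
--         palavras.append(palavra)
--
--     for i in range(len(palavras)-1, -1, -1):
--         if palavras[i] == "Falar" or palavras[i] == "Por" or palavras[i] == "Valor" or palavras[i] == "Fale" or palavras[i] == "Tem":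
--             break
--         elif palavras[i][0].isupper() and len(nome_responsavel) < 3:
--             nome_responsavel.insert(0, palavras[i])
--         else:
--             continue
--     return " ".join(nome_responsavel).strip(",.")
-- ===== SOURCE B (Python) =====
-- def pegar_responsavel(s):
--     stops = ("Falar", "Por", "Valor", "Fale", "Tem")
--     palavras = [w.strip(",") for w in s.split(". ")[-1].strip().split()]
--     cands = []
--     for w in palavras:
--         if w in stops:
--             cands = []
--         else:
--             cands.append(w)
--     names = [w for w in cands if w[0].isupper()]
--     return " ".join(names[-3:]).strip(",.")
-- ===== Notes on version B (the rewrite author's own statement) =====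
-- stated objective: simpler
-- what changed: A's backward indexed scan with break-on-stop-word and front-insertion capped at 3 is replaced by a single forward pass that resets an accumulator at each stop word, then a filter on capitalised words and taking the last three with names[-3:].
import Mathlib
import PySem

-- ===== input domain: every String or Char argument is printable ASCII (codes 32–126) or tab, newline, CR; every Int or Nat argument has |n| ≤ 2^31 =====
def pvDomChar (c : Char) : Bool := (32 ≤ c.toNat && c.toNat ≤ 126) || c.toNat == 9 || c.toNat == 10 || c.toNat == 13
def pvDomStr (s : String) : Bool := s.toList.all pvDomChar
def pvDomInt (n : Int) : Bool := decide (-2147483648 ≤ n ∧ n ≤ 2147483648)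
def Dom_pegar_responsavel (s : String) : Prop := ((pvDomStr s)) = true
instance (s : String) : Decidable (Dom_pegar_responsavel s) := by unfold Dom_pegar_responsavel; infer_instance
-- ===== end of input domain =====

-- B replaces A's backward indexed scan (break on stop word, insert at front, cap 3) by a single
-- forward pass that resets an accumulator at each stop word, then filters and keeps the last three
-- (objective: simpler decomposition; same result).

-- ===== PORT A =====
-- stop-word test: palavras[i] == "Falar" or … or palavras[i] == "Tem"
def pvStop (w : String) : Bool :=
  w == "Falar" || w == "Por" || w == "Valor" || w == "Fale" || w == "Tem"

-- palavra[0].isupper(); the default ' ' is only reached on the empty token, where Python raises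
-- IndexError (excluded by Pre_).
def pvUpper0 (w : String) : Bool := PySem.Chars.isupper (w.toList.headD ' ')

-- the 'for i in range(len(palavras)-1, -1, -1)' loop with break, as recursion over the reversed list
def pegarLoopA : List String → List String → List String
  | [], nome => nome
  | w :: ws, nome =>
    if pvStop w then nome
    else if pvUpper0 w ∧ nome.length < 3 then pegarLoopA ws (w :: nome)
    else pegarLoopA ws nome

def pegar_responsavel (s : String) : String :=
  let frases := (PySem.Str.split? s ". ").getD []
  let ultima_frase := PySem.Str.strip ((PySem.List.pyGet? frases (-1)).getD "")
  let palavras_ultima_frase := PySem.Str.split₀ ultima_frase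
  let palavras := palavras_ultima_frase.foldl
    (fun acc palavra => acc ++ [PySem.Str.stripChars palavra ","]) []
  PySem.Str.stripChars (PySem.Str.join " " (pegarLoopA palavras.reverse [])) ",."

-- ===== PORT B =====
def pvStopsB : List String := ["Falar", "Por", "Valor", "Fale", "Tem"]

def pegar_responsavel_alt (s : String) : String :=
  let palavras := (PySem.Str.split₀ (PySem.Str.strip
      ((PySem.List.pyGet? ((PySem.Str.split? s ". ").getD []) (-1)).getD ""))).map
      (fun w => PySem.Str.stripChars w ",")
  let cands := palavras.foldl (fun acc w => if pvStopsB.contains w then [] else acc ++ [w]) []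
  let names := cands.filter (fun w => PySem.Chars.isupper (w.toList.headD ' '))
  PySem.Str.stripChars (PySem.Str.join " " (PySem.List.slice names (some (-3)) none)) ",."

-- ===== PRECONDITION & SPEC =====
-- tokenisation repeated for the precondition (Pre_ may not reach the ports)
def pvTokens (s : String) : List String :=
  (PySem.Str.split₀ (PySem.Str.strip
      ((PySem.List.pyGet? ((PySem.Str.split? s ". ").getD []) (-1)).getD ""))).map
      (fun w => PySem.Str.stripChars w ",")

-- Pre_ excludes exactly the inputs on which Python A raises IndexError: a token of the last
-- sentence that becomes empty after stripping commas and has no stop word after it (the backward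
-- scan reaches it and evaluates palavras[i][0]).
def Pre_pegar_responsavel (s : String) : Prop :=
  ∀ i, i < (pvTokens s).length → (pvTokens s).getD i "x" = "" →
    ∃ j, j < (pvTokens s).length ∧ i < j ∧ pvStop ((pvTokens s).getD j "") = true
instance (s : String) : Decidable (Pre_pegar_responsavel s) := by
  unfold Pre_pegar_responsavel; infer_instance

def pvWitness_pegar_responsavel : String := "Falar com Joao Silva"

def Spec_pegar_responsavel (s : String) (out : String) : Prop := out = pegar_responsavel_alt s
instance (s : String) (out : String) : Decidable (Spec_pegar_responsavel s out) := by
  unfold Spec_pegar_responsavel; infer_instance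

-- ===== CLAIM (what is proved, stated in full; the proofs are below) =====
def Claim_equal_pegar_responsavel : Prop := ∀ (s : String), Dom_pegar_responsavel s → Pre_pegar_responsavel s → Spec_pegar_responsavel s (pegar_responsavel s)

-- ===== LEMMAS AND PROOFS =====

-- B's membership test agrees with A's equality chain
theorem pvStop_eq_contains (w : String) : pvStopsB.contains w = pvStop w := by
  rw [Bool.eq_iff_iff]; simp [pvStopsB, pvStop]; tauto

-- characterisation of B's reset-accumulator fold
theorem candsB_spec (L acc : List String) (hacc : ∀ w ∈ acc, pvStop w = false) :
    (∀ w ∈ L.foldl (fun acc w => if pvStopsB.contains w then [] else acc ++ [w]) acc,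
        pvStop w = false) ∧
    ((L.foldl (fun acc w => if pvStopsB.contains w then [] else acc ++ [w]) acc = acc ++ L ∧
        ∀ w ∈ L, pvStop w = false) ∨
      ∃ p v, pvStop v = true ∧
        L = p ++ v :: L.foldl (fun acc w => if pvStopsB.contains w then [] else acc ++ [w]) acc) := by
  induction L generalizing acc with
  | nil => exact ⟨hacc, Or.inl ⟨by simp, by simp⟩⟩
  | cons w ws ih =>
    by_cases hw : pvStop w = true
    · have hwB : pvStopsB.contains w = true := by rw [pvStop_eq_contains]; exact hw
      have step : (w :: ws).foldl (fun acc w => if pvStopsB.contains w then [] else acc ++ [w]) acc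
          = ws.foldl (fun acc w => if pvStopsB.contains w then [] else acc ++ [w]) [] := by
        rw [List.foldl_cons, if_pos hwB]
      obtain ⟨h1, h2⟩ := ih [] (by simp)
      refine ⟨by rw [step]; exact h1, Or.inr ?_⟩
      rcases h2 with ⟨heq, _⟩ | ⟨p, v, hv, heq⟩
      · exact ⟨[], w, hw, by rw [step, heq]; simp⟩
      · exact ⟨w :: p, v, hv, by rw [step, List.cons_append]; conv_lhs => rw [heq]⟩
    · simp only [Bool.not_eq_true] at hw
      have hwB : ¬ pvStopsB.contains w = true := by rw [pvStop_eq_contains, hw]; simp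
      have step : (w :: ws).foldl (fun acc w => if pvStopsB.contains w then [] else acc ++ [w]) acc
          = ws.foldl (fun acc w => if pvStopsB.contains w then [] else acc ++ [w]) (acc ++ [w]) := by
        rw [List.foldl_cons, if_neg hwB]
      obtain ⟨h1, h2⟩ := ih (acc ++ [w]) (by
        intro x hx; rcases List.mem_append.1 hx with h | h
        · exact hacc x h
        · simp at h; subst h; exact hw)
      refine ⟨by rw [step]; exact h1, ?_⟩
      rcases h2 with ⟨heq, hns⟩ | ⟨p, v, hv, heq⟩
      · exact Or.inl ⟨by rw [step, heq]; simp, by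
          intro x hx; rcases List.mem_cons.1 hx with h | h
          · subst h; exact hw
          · exact hns x h⟩
      · exact Or.inr ⟨w :: p, v, hv, by rw [step, List.cons_append]; conv_lhs => rw [heq]⟩

-- A's backward loop over a stop-free prefix followed by a stop word (or nothing)
theorem pegarLoopA_spec (xs : List String) :
    ∀ tail acc, (∀ w ∈ xs, pvStop w = false) →
      (tail = [] ∨ ∃ h t, tail = h :: t ∧ pvStop h = true) →
      pegarLoopA (xs ++ tail) acc =
        (((xs.filter pvUpper0).take (3 - acc.length)).reverse) ++ acc := by
  induction xs with
  | nil =>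
    intro tail acc _ htail
    rcases htail with rfl | ⟨h, t, rfl, hs⟩
    · simp [pegarLoopA]
    · simp [pegarLoopA, hs]
  | cons w ws ih =>
    intro tail acc hns htail
    have hw : pvStop w = false := hns w (by simp)
    by_cases hu : pvUpper0 w = true
    · by_cases hl : acc.length < 3
      · have : pegarLoopA ((w :: ws) ++ tail) acc = pegarLoopA (ws ++ tail) (w :: acc) := by
          simp [pegarLoopA, hw, hu, hl]
        rw [this, ih tail (w :: acc) (fun x hx => hns x (by simp [hx])) htail]
        have h3 : 3 - acc.length = (3 - (w :: acc).length) + 1 := by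
          simp [List.length_cons]; omega
        simp [hu, h3, List.take_succ_cons]
      · have h0 : 3 - acc.length = 0 := by omega
        have : pegarLoopA ((w :: ws) ++ tail) acc = pegarLoopA (ws ++ tail) acc := by
          simp [pegarLoopA, hw]
          intro _; omega
        rw [this, ih tail acc (fun x hx => hns x (by simp [hx])) htail]
        simp [h0]
    · simp only [Bool.not_eq_true] at hu
      have : pegarLoopA ((w :: ws) ++ tail) acc = pegarLoopA (ws ++ tail) acc := by
        simp [pegarLoopA, hw, hu]
      rw [this, ih tail acc (fun x hx => hns x (by simp [hx])) htail]
      simp [hu]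

-- last-three of a list: reversed take-3 of the reverse is drop (len - 3)
theorem reverse_take_three (l : List String) :
    ((l.reverse.take 3).reverse) = l.drop (l.length - 3) := by
  rw [List.take_reverse, List.reverse_reverse]

-- the two loop results agree on the shared token list
theorem loops_agree (L : List String) :
    pegarLoopA L.reverse [] =
      PySem.List.slice
        ((L.foldl (fun acc w => if pvStopsB.contains w then [] else acc ++ [w]) []).filter pvUpper0)
        (some (-3)) none := by
  obtain ⟨hfree, hcase⟩ := candsB_spec L [] (by simp)
  set r := L.foldl (fun acc w => if pvStopsB.contains w then [] else acc ++ [w]) [] with hr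
  rw [PySem.List.slice_from_neg_ofNat _ 3 (by omega)]
  have key : pegarLoopA L.reverse [] = ((r.filter pvUpper0).reverse.take 3).reverse := by
    rcases hcase with ⟨heq, _⟩ | ⟨p, v, hv, heq⟩
    · have hL : L.reverse = r.reverse ++ [] := by rw [heq]; simp
      rw [hL, pegarLoopA_spec r.reverse [] []
        (by intro x hx; exact hfree x (List.mem_reverse.1 hx)) (Or.inl rfl)]
      simp [List.filter_reverse]
    · have hL : L.reverse = r.reverse ++ (v :: p.reverse) := by rw [heq]; simp
      rw [hL, pegarLoopA_spec r.reverse (v :: p.reverse) []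
        (by intro x hx; exact hfree x (List.mem_reverse.1 hx))
        (Or.inr ⟨v, p.reverse, rfl, hv⟩)]
      simp [List.filter_reverse]
  rw [key]
  exact reverse_take_three _

theorem ab_eq (s : String) : pegar_responsavel s = pegar_responsavel_alt s := by
  unfold pegar_responsavel pegar_responsavel_alt
  simp only [PySem.List.foldl_append_singleton_eq_map, List.nil_append]
  exact congrArg (fun l => PySem.Str.stripChars (PySem.Str.join " " l) ",.") (loops_agree _)

-- ===== VERDICT (by name: the statement is the Claim_ definition above) =====
theorem pegar_responsavel_spec : Claim_equal_pegar_responsavel := by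
  intro s _ _
  exact ab_eq s
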